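-- pv_equiv track=rewrite | github.com/apolloxuteng/kid-agent | backend/server.py | _strip_role_labels
-- ===== SOURCE A (Python) =====
-- def _strip_role_labels(text: str) -> str:
--     """Remove leading 'Assistant:' / 'User:' and similar so only the reply text is returned.
--     Helps especially with smaller completion-style models; larger chat models often follow
--     the 'no role labels' instruction better, but stripping is a safe fallback for any size."""
--     if not text:
--         return text
--     out = text.strip()
--     while True:
--         lower = out.lower().lstrip()
--         if lower.startswith("assistant:"):
--             out = out[out.lower().find("assistant:") + len("assistant:") :].strip()
--         elif lower.startswith("user:"):
--             out = out[out.lower().find("user:") + len("user:") :].strip()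
--         else:
--             break
--     return out.strip()
-- ===== SOURCE B (Python) =====
-- def _strip_role_labels(text: str) -> str:
--     # Single pass over one precomputed lowercase copy: advance an index past
--     # leading role labels and whitespace, then slice once at the end.
--     if not text:
--         return text
--     s = text.strip()
--     low = s.lower()
--     n = len(s)
--     i = 0
--     while True:
--         if low.startswith("assistant:", i):
--             i += 10
--         elif low.startswith("user:", i):
--             i += 5
--         else:
--             return s[i:]
--         while i < n and s[i].isspace():
--             i += 1
-- ===== Notes on version B (the rewrite author's own statement) =====
-- stated objective: alternative
-- what changed: A repeatedly re-lowercases, re-searches and re-slices/strips the string each loop iteration; B lowercases once and advances a single index past leading labels and whitespace in one pass, slicing once at the end.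
import Mathlib
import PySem

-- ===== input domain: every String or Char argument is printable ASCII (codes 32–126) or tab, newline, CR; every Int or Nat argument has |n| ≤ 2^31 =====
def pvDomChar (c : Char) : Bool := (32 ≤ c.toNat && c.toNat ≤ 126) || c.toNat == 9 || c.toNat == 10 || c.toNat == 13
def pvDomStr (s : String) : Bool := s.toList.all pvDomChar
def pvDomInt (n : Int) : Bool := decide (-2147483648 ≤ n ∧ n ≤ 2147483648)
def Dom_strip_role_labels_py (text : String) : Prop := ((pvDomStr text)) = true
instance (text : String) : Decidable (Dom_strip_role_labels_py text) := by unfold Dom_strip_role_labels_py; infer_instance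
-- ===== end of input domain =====

-- B replaces A's repeated lower/slice/strip loop by a single index pass over one
-- precomputed lowercase copy (objective: alternative / more idiomatic single pass).


-- ===== PORT A =====
-- helper lemmas needed by the ports' termination proofs (cited in decreasing_by)
theorem pvStrip_length_le (t : List Char) : (PySem.Chars.strip t).length ≤ t.length := by
  have h1 : (PySem.Chars.lstrip t).length ≤ t.length :=
    (List.dropWhile_sublist _).length_le
  have h2 : (PySem.Chars.rstrip (PySem.Chars.lstrip t)).length ≤ (PySem.Chars.lstrip t).length := by
    simpa [PySem.Chars.rstrip] using (List.dropWhile_sublist (l := (PySem.Chars.lstrip t).reverse)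
      (p := PySem.Chars.isspace)).length_le
  simpa [PySem.Chars.strip] using le_trans h2 h1

theorem pvDecA (out lab : List Char) (d : Int) (hd : 5 ≤ d) (hlab : lab ≠ [])
    (h : PySem.Chars.startswith (PySem.Chars.lstrip (PySem.Chars.lower out)) lab = true) :
    (PySem.Chars.strip (PySem.Chars.slice out
      (some (PySem.Chars.find (PySem.Chars.lower out) lab + d)) none)).length < out.length := by
  have hpre : lab <+: PySem.Chars.lstrip (PySem.Chars.lower out) :=
    (PySem.Chars.startswith_iff _ _).mp h
  have hne : 0 < out.length := by
    have h1 : lab.length ≤ (PySem.Chars.lstrip (PySem.Chars.lower out)).length := hpre.length_le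
    have h2 : (PySem.Chars.lstrip (PySem.Chars.lower out)).length ≤ (PySem.Chars.lower out).length :=
      (List.dropWhile_sublist _).length_le
    have h3 : (PySem.Chars.lower out).length = out.length := by
      simp [PySem.Chars.lower]
    have h4 : 0 < lab.length := List.length_pos_of_ne_nil hlab
    omega
  have hfind : -1 ≤ PySem.Chars.find (PySem.Chars.lower out) lab :=
    PySem.Chars.neg_one_le_find _ _
  set k : Int := PySem.Chars.find (PySem.Chars.lower out) lab + d with hk
  have hk0 : 0 ≤ k := by omega
  have hk1 : 1 ≤ k.toNat := by omega
  have hs : PySem.Chars.slice out (some k) none = out.drop k.toNat := by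
    rw [PySem.Chars.slice_eq_listSlice, PySem.List.slice_from _ hk0]
  rw [hs]
  have := pvStrip_length_le (out.drop k.toNat)
  have hd' : (out.drop k.toNat).length = out.length - k.toNat := by simp
  omega

def pvLoopA (out : List Char) : List Char :=
  let lower := PySem.Chars.lstrip (PySem.Chars.lower out)
  if h1 : PySem.Chars.startswith lower "assistant:".toList then
    pvLoopA (PySem.Chars.strip (PySem.Chars.slice out
      (some (PySem.Chars.find (PySem.Chars.lower out) "assistant:".toList + 10)) none))
  else if h2 : PySem.Chars.startswith lower "user:".toList then
    pvLoopA (PySem.Chars.strip (PySem.Chars.slice out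
      (some (PySem.Chars.find (PySem.Chars.lower out) "user:".toList + 5)) none))
  else out
termination_by out.length
decreasing_by
  · exact pvDecA out _ 10 (by norm_num) (by decide) h1
  · exact pvDecA out _ 5 (by norm_num) (by decide) h2

def strip_role_labels_py (text : String) : String :=
  if text.toList = [] then text
  else String.ofList (PySem.Chars.strip (pvLoopA (PySem.Chars.strip text.toList)))

-- ===== PORT B =====
def pvSkipWs (s : List Char) (n j : Nat) : Nat :=
  if j < n && PySem.Chars.isspace (s.getD j ' ') then pvSkipWs s n (j + 1) else j
termination_by n - j
decreasing_by simp_all; omega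

theorem pvSkipWs_ge_aux (s : List Char) (n : Nat) : ∀ m j, n - j ≤ m → j ≤ pvSkipWs s n j := by
  intro m
  induction m with
  | zero =>
      intro j hj
      rw [pvSkipWs]
      have : ¬ j < n := by omega
      simp [this]
  | succ m ih =>
      intro j hj
      rw [pvSkipWs]
      by_cases hjn : j < n
      · by_cases hsp : PySem.Chars.isspace (s.getD j ' ') = true
        · have h1 := ih (j + 1) (by omega)
          simp only [hjn, hsp, decide_true, Bool.and_true, if_true]
          omega
        · simp only [hjn, decide_true, Bool.true_and]
          rw [if_neg hsp]
      · simp [hjn]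

theorem pvSkipWs_ge (s : List Char) (n j : Nat) : j ≤ pvSkipWs s n j :=
  pvSkipWs_ge_aux s n (n - j) j le_rfl

theorem pvB_startswith_len (t lab : List Char) (i : Nat)
    (h : PySem.Chars.startswith (t.drop i) lab = true) : lab.length ≤ t.length - i := by
  have hpre : lab <+: t.drop i := (PySem.Chars.startswith_iff _ _).mp h
  have := hpre.length_le
  simpa using this

def pvLoopB (s low : List Char) (n i : Nat) : Nat :=
  if h1 : PySem.Chars.startswith (low.drop i) "assistant:".toList then
    pvLoopB s low n (pvSkipWs s n (i + 10))
  else if h2 : PySem.Chars.startswith (low.drop i) "user:".toList then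
    pvLoopB s low n (pvSkipWs s n (i + 5))
  else i
termination_by low.length - i
decreasing_by
  · have ha := pvB_startswith_len low _ i h1
    have hb := pvSkipWs_ge s n (i + 10)
    have hc : ("assistant:".toList).length = 10 := by decide
    rw [hc] at ha
    omega
  · have ha := pvB_startswith_len low _ i h2
    have hb := pvSkipWs_ge s n (i + 5)
    have hc : ("user:".toList).length = 5 := by decide
    rw [hc] at ha
    omega

def strip_role_labels_py_alt (text : String) : String :=
  if text.toList = [] then text
  else
    let s := PySem.Chars.strip text.toList
    let low := PySem.Chars.lower s
    String.ofList (s.drop (pvLoopB s low s.length 0))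

-- ===== PRECONDITION & SPEC =====
def Spec_strip_role_labels_py (text : String) (out : String) : Prop := out = strip_role_labels_py_alt text
instance (text : String) (out : String) : Decidable (Spec_strip_role_labels_py text out) := by unfold Spec_strip_role_labels_py; infer_instance

-- ===== CLAIM (what is proved, stated in full; the proofs are below) =====
def Claim_equal_strip_role_labels_py : Prop := ∀ (text : String), Dom_strip_role_labels_py text → Spec_strip_role_labels_py text (strip_role_labels_py text)

-- ===== LEMMAS AND PROOFS =====
theorem pvDropWhile_prefix (p : Char → Bool) (l l' : List Char)
    (h : l.dropWhile p = l) (hp : l' <+: l) : l'.dropWhile p = l' := by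
  cases l' with
  | nil => simp
  | cons a t =>
      cases l with
      | nil => simp at hp
      | cons b m =>
          have hb : p b = false := by
            by_contra hpb
            have hpb' : p b = true := by simpa using hpb
            rw [List.dropWhile_cons_of_pos hpb'] at h
            have := (List.dropWhile_sublist (p := p) (l := m)).length_le
            have hlen := congrArg List.length h
            simp at hlen
            omega
          have hab : a = b := by
            rcases hp with ⟨r, hr⟩
            simpa using congrArg (fun l => l.head?) hr
          rw [List.dropWhile_cons_of_neg (by rw [hab, hb]; simp)]

theorem pvRstrip_eq_self_of_suffix (s t : List Char)
    (hr : PySem.Chars.rstrip s = s) (h : t <:+ s) : PySem.Chars.rstrip t = t := by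
  have hs : s.reverse.dropWhile PySem.Chars.isspace = s.reverse := by
    have := congrArg List.reverse hr
    simpa [PySem.Chars.rstrip] using this
  have hpre : t.reverse <+: s.reverse := List.reverse_prefix.mpr h
  have := pvDropWhile_prefix PySem.Chars.isspace s.reverse t.reverse hs hpre
  simp [PySem.Chars.rstrip, this]

theorem pvRstrip_drop (s : List Char) (k : Nat)
    (hr : PySem.Chars.rstrip s = s) : PySem.Chars.rstrip (s.drop k) = s.drop k :=
  pvRstrip_eq_self_of_suffix s (s.drop k) hr (List.drop_suffix k s)

theorem pvLstrip_strip (t : List Char) :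
    PySem.Chars.lstrip (PySem.Chars.strip t) = PySem.Chars.strip t := by
  have hu : (PySem.Chars.lstrip t).dropWhile PySem.Chars.isspace = PySem.Chars.lstrip t :=
    List.dropWhile_idempotent _ _
  have hpre : (PySem.Chars.strip t) <+: PySem.Chars.lstrip t := by
    have h1 : ((PySem.Chars.lstrip t).reverse.dropWhile PySem.Chars.isspace) <:+ (PySem.Chars.lstrip t).reverse :=
      List.dropWhile_suffix _
    have := List.reverse_prefix.mpr h1
    simpa [PySem.Chars.strip, PySem.Chars.rstrip] using this
  exact pvDropWhile_prefix _ _ _ hu hpre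

theorem pvRstrip_strip (t : List Char) :
    PySem.Chars.rstrip (PySem.Chars.strip t) = PySem.Chars.strip t := by
  simp [PySem.Chars.strip, PySem.Chars.rstrip, List.dropWhile_idempotent]

theorem pvIsspace_false (c : Char) (h : 33 ≤ c.toNat) (h' : c.toNat ≤ 126) :
    PySem.Chars.isspace c = false := by
  simp only [PySem.Chars.isspace, Bool.or_eq_false_iff, Bool.and_eq_false_iff,
    decide_eq_false_iff_not, not_le]
  omega

theorem pvIsspace_lowerChar (c : Char) :
    PySem.Chars.isspace (PySem.Chars.lowerChar c) = PySem.Chars.isspace c := by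
  unfold PySem.Chars.lowerChar
  by_cases h : PySem.Chars.isupper c = true
  · have hb : 'A' ≤ c ∧ c ≤ 'Z' := by simpa [PySem.Chars.isupper] using h
    have h1 : 65 ≤ c.toNat ∧ c.toNat ≤ 90 := ⟨hb.1, hb.2⟩
    have h2 : (Char.ofNat (c.toNat + 32)).toNat = c.toNat + 32 := by
      have hv : (c.toNat + 32).isValidChar := Or.inl (by omega)
      rw [Char.ofNat, dif_pos hv]
      exact Char.toNat_ofNatAux hv
    rw [if_pos h, pvIsspace_false _ (by omega) (by omega),
      pvIsspace_false c (by omega) (by omega)]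
  · simp [h]

theorem pvLower_drop (s : List Char) (i : Nat) :
    PySem.Chars.lower (s.drop i) = (PySem.Chars.lower s).drop i := by
  simp [PySem.Chars.lower, List.map_drop]

theorem pvLstrip_lower (t : List Char) :
    PySem.Chars.lstrip (PySem.Chars.lower t) = PySem.Chars.lower (PySem.Chars.lstrip t) := by
  have hp : (PySem.Chars.isspace ∘ PySem.Chars.lowerChar) = PySem.Chars.isspace := by
    funext c; simp [pvIsspace_lowerChar]
  simp [PySem.Chars.lstrip, PySem.Chars.lower, List.dropWhile_map, hp]

theorem pvCond (s : List Char) (i : Nat) (hl : PySem.Chars.lstrip (s.drop i) = s.drop i)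
    (lab : List Char) :
    PySem.Chars.startswith (PySem.Chars.lstrip (PySem.Chars.lower (s.drop i))) lab
      = PySem.Chars.startswith ((PySem.Chars.lower s).drop i) lab := by
  rw [pvLstrip_lower, hl, pvLower_drop]

theorem pvFind_zero (t lab : List Char) (h : PySem.Chars.startswith t lab = true) :
    PySem.Chars.find t lab = 0 := by
  have hp : lab <+: t := (PySem.Chars.startswith_iff _ _).mp h
  have h0 : 0 ≤ PySem.Chars.find t lab := (PySem.Chars.find_nonneg_iff _ _).mpr hp.isInfix
  obtain ⟨h1, h2⟩ := PySem.Chars.find_spec h0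
  by_contra hne
  have hpos : 0 < (PySem.Chars.find t lab).toNat := by omega
  exact h2 0 hpos (by simpa using hp)

theorem pvLstrip_skip_aux (s : List Char) : ∀ m j, s.length - j ≤ m →
    PySem.Chars.lstrip (s.drop j) = s.drop (pvSkipWs s s.length j) := by
  intro m
  induction m with
  | zero =>
      intro j hj
      have hnj : ¬ j < s.length := by omega
      rw [pvSkipWs, if_neg (by simp [hnj])]
      rw [List.drop_eq_nil_of_le (by omega)]
      simp [PySem.Chars.lstrip]
  | succ m ih =>
      intro j hj
      rw [pvSkipWs]
      by_cases hjn : j < s.length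
      · have hget : s.getD j ' ' = s[j] := List.getD_eq_getElem s ' ' hjn
        by_cases hsp : PySem.Chars.isspace s[j] = true
        · rw [if_pos (by rw [hget]; simp [hjn, hsp])]
          rw [← ih (j + 1) (by omega)]
          conv_lhs => rw [List.drop_eq_getElem_cons hjn]
          simp only [PySem.Chars.lstrip]
          exact List.dropWhile_cons_of_pos hsp
        · have hg2 : PySem.Chars.isspace (s.getD j ' ') = false := by
            rw [hget]; simpa using hsp
          have hcond : (decide (j < s.length) && PySem.Chars.isspace (s.getD j ' ')) = false := by
            rw [hg2]; simp
          rw [if_neg (by rw [hcond]; simp)]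
          rw [List.drop_eq_getElem_cons hjn]
          simp only [PySem.Chars.lstrip]
          rw [List.dropWhile_cons_of_neg (by simpa using hsp)]
      · rw [if_neg (by simp [hjn])]
        rw [List.drop_eq_nil_of_le (by omega)]
        simp [PySem.Chars.lstrip]

theorem pvLstrip_skip (s : List Char) (j : Nat) :
    PySem.Chars.lstrip (s.drop j) = s.drop (pvSkipWs s s.length j) :=
  pvLstrip_skip_aux s (s.length - j) j le_rfl

theorem pvStep (s : List Char) (hr : PySem.Chars.rstrip s = s) (i : Nat) (dI : Int) (d : Nat)
    (hdd : dI = (d : Int)) :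
    PySem.Chars.strip (PySem.Chars.slice (s.drop i) (some ((0 : Int) + dI)) none)
      = s.drop (pvSkipWs s s.length (i + d)) := by
  subst hdd
  have h1 : PySem.Chars.slice (s.drop i) (some ((0 : Int) + (d : Int))) none = s.drop (i + d) := by
    rw [PySem.Chars.slice_eq_listSlice, zero_add, PySem.List.slice_from _ (by positivity)]
    rw [List.drop_drop, Int.toNat_natCast]
  rw [h1]
  show PySem.Chars.rstrip (PySem.Chars.lstrip (s.drop (i + d))) = _
  rw [pvLstrip_skip, pvRstrip_drop s _ hr]

theorem pvMain (s : List Char) (hr : PySem.Chars.rstrip s = s) :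
    ∀ m i, s.length - i ≤ m → PySem.Chars.lstrip (s.drop i) = s.drop i →
      pvLoopA (s.drop i) = s.drop (pvLoopB s (PySem.Chars.lower s) s.length i) ∧
      PySem.Chars.lstrip (s.drop (pvLoopB s (PySem.Chars.lower s) s.length i)) =
        s.drop (pvLoopB s (PySem.Chars.lower s) s.length i) := by
  intro m
  induction m with
  | zero =>
      intro i hi hl
      have hnil : (PySem.Chars.lower s).drop i = [] :=
        List.drop_eq_nil_of_le (by simp [PySem.Chars.lower]; omega)
      have hA1 : PySem.Chars.startswith (PySem.Chars.lstrip (PySem.Chars.lower (s.drop i)))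
          "assistant:".toList = false := by
        rw [pvCond s i hl, hnil]; decide
      have hA2 : PySem.Chars.startswith (PySem.Chars.lstrip (PySem.Chars.lower (s.drop i)))
          "user:".toList = false := by
        rw [pvCond s i hl, hnil]; decide
      have hB1 : PySem.Chars.startswith ((PySem.Chars.lower s).drop i) "assistant:".toList = false := by
        rw [hnil]; decide
      have hB2 : PySem.Chars.startswith ((PySem.Chars.lower s).drop i) "user:".toList = false := by
        rw [hnil]; decide
      rw [pvLoopA, pvLoopB]
      simp only [hA1, hA2, hB1, hB2, Bool.false_eq_true, dite_false]
      exact ⟨trivial, hl⟩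
  | succ m ih =>
      intro i hi hl
      have hc1 := pvCond s i hl "assistant:".toList
      have hc2 := pvCond s i hl "user:".toList
      rw [pvLoopA, pvLoopB]
      by_cases h1 : PySem.Chars.startswith ((PySem.Chars.lower s).drop i) "assistant:".toList = true
      · rw [dif_pos (hc1.trans (by rw [h1])), dif_pos h1]
        have h1' : PySem.Chars.startswith (PySem.Chars.lower (s.drop i)) "assistant:".toList = true := by
          rw [pvLower_drop]; exact h1
        rw [pvFind_zero _ _ h1', pvStep s hr i 10 10 (by norm_num)]
        have hlen : ("assistant:".toList).length ≤ s.length - i := by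
          have := pvB_startswith_len (PySem.Chars.lower s) _ i h1
          simpa [PySem.Chars.lower] using this
        have hlen10 : 10 ≤ s.length - i := by
          have : ("assistant:".toList).length = 10 := by decide
          omega
        have hge := pvSkipWs_ge s s.length (i + 10)
        refine ih (pvSkipWs s s.length (i + 10)) (by omega) ?_
        rw [← pvLstrip_skip]
        exact List.dropWhile_idempotent _ _
      · rw [dif_neg (by rw [hc1]; exact h1)]
        rw [dif_neg h1]
        by_cases h2 : PySem.Chars.startswith ((PySem.Chars.lower s).drop i) "user:".toList = true
        · rw [dif_pos (hc2.trans (by rw [h2])), dif_pos h2]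
          have h2' : PySem.Chars.startswith (PySem.Chars.lower (s.drop i)) "user:".toList = true := by
            rw [pvLower_drop]; exact h2
          rw [pvFind_zero _ _ h2', pvStep s hr i 5 5 (by norm_num)]
          have hlen : ("user:".toList).length ≤ s.length - i := by
            have := pvB_startswith_len (PySem.Chars.lower s) _ i h2
            simpa [PySem.Chars.lower] using this
          have hlen5 : 5 ≤ s.length - i := by
            have : ("user:".toList).length = 5 := by decide
            omega
          have hge := pvSkipWs_ge s s.length (i + 5)
          refine ih (pvSkipWs s s.length (i + 5)) (by omega) ?_
          rw [← pvLstrip_skip]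
          exact List.dropWhile_idempotent _ _
        · rw [dif_neg (by rw [hc2]; exact h2)]
          rw [dif_neg h2]
          exact ⟨rfl, hl⟩

-- ===== VERDICT (by name: the statement is the Claim_ definition above) =====
theorem strip_role_labels_py_spec : Claim_equal_strip_role_labels_py := by
  unfold Claim_equal_strip_role_labels_py
  intro text _
  unfold Spec_strip_role_labels_py strip_role_labels_py strip_role_labels_py_alt
  by_cases h : text.toList = []
  · rw [if_pos h, if_pos h]
  · rw [if_neg h, if_neg h]
    set s := PySem.Chars.strip text.toList with hs
    have hr : PySem.Chars.rstrip s = s := pvRstrip_strip text.toList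
    have hl : PySem.Chars.lstrip (s.drop 0) = s.drop 0 := by
      simpa using pvLstrip_strip text.toList
    obtain ⟨hmain, hlf⟩ := pvMain s hr s.length 0 (by omega) hl
    rw [show s.drop 0 = s from by simp] at hmain
    rw [hmain]
    congr 1
    show PySem.Chars.rstrip (PySem.Chars.lstrip _) = _
    rw [hlf, pvRstrip_drop s _ hr]
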